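-- pv_equiv track=rewrite | github.com/NicolasADavid/PythonChallenges | Leetcode/first-bad-version(2).py | lastGoodVersion
-- ===== SOURCE A (Python) =====
-- def isBadVersion(n: int) -> bool:
--     badVers = [x for x in range(6, 9)]
--
--     return n in badVers
--
-- def lastGoodVersion(n: int) -> bool:
--     lo, hi = 1, n
--
--     while lo < hi:
--         mid = (lo + hi + 1) // 2
--         # (hi+lo) is an odd number, division: (1+4+1) // 2 == 3, pointer moves to the right, "ceiling" division
--         # (hi+lo) is an even number, division: (1+3+1) // 2 == 2, same as (1+3) // 2, nothing changes
--         if isBadVersion(mid):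
--             hi = mid - 1
--         else:
--             lo = mid
--
--     return lo
-- ===== SOURCE B (Python) =====
-- def isBadVersion(n: int) -> bool:
--     badVers = [x for x in range(6, 9)]
--
--     return n in badVers
--
-- def lastGoodVersion(n: int) -> bool:
--     def search(lo: int, hi: int) -> int:
--         if lo >= hi:
--             return lo
--         mid = (lo + hi + 1) // 2
--         if isBadVersion(mid):
--             return search(lo, mid - 1)
--         return search(mid, hi)
--
--     return search(1, n)
-- ===== Notes on version B (the rewrite author's own statement) =====
-- stated objective: alternative
-- what changed: rewrote the iterative while-loop binary search as a recursive helper search(lo, hi) that shrinks the interval by recursion instead of mutating loop variables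
import Mathlib
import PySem

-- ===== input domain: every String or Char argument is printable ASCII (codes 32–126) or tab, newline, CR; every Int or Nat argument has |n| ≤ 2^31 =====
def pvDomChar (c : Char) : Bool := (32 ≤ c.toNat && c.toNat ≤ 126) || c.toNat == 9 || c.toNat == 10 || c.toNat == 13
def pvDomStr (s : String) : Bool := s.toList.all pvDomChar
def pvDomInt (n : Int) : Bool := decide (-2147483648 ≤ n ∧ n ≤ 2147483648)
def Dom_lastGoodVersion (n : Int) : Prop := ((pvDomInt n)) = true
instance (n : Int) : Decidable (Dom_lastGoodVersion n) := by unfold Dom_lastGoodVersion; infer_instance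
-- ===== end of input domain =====

-- B rewrites the iterative while-loop binary search as a recursive interval helper
-- (objective: alternative decomposition, same cost).

-- ===== PORT A =====
def isBadVersionA (n : Int) : Bool :=
  let badVers := PySem.List.pyRange 6 9 1
  badVers.contains n

-- the 'while lo < hi' loop of A; the fuel (interval width) only makes the same
-- computation total — each iteration shrinks hi - lo by at least 1
def lgvLoopA : Nat → Int → Int → Int
  | 0, lo, _ => lo
  | k + 1, lo, hi =>
    if lo < hi then
      let mid := PySem.Int.floordiv (lo + hi + 1) 2
      if isBadVersionA mid then lgvLoopA k lo (mid - 1) else lgvLoopA k mid hi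
    else lo

def lastGoodVersion (n : Int) : Int := lgvLoopA (n - 1).toNat 1 n

-- ===== PORT B =====
def isBadVersionB (n : Int) : Bool :=
  let badVers := PySem.List.pyRange 6 9 1
  badVers.contains n

-- B's recursive helper 'search(lo, hi)'; well-founded on the interval width
def lgvSearchB (lo hi : Int) : Int :=
  if h : lo ≥ hi then lo
  else
    let mid := PySem.Int.floordiv (lo + hi + 1) 2
    if isBadVersionB mid then lgvSearchB lo (mid - 1) else lgvSearchB mid hi
termination_by (hi - lo).toNat
decreasing_by
  · have hm : PySem.Int.floordiv (lo + hi + 1) 2 = (lo + hi + 1) / 2 :=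
      PySem.Int.floordiv_eq_ediv_of_pos (by omega)
    simp only [hm]; omega
  · have hm : PySem.Int.floordiv (lo + hi + 1) 2 = (lo + hi + 1) / 2 :=
      PySem.Int.floordiv_eq_ediv_of_pos (by omega)
    simp only [hm]; omega

def lastGoodVersion_alt (n : Int) : Int := lgvSearchB 1 n

-- ===== PRECONDITION & SPEC =====
def Spec_lastGoodVersion (n : Int) (out : Int) : Prop := out = lastGoodVersion_alt n
instance (n : Int) (out : Int) : Decidable (Spec_lastGoodVersion n out) := by unfold Spec_lastGoodVersion; infer_instance

-- ===== CLAIM (what is proved, stated in full; the proofs are below) =====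
def Claim_equal_lastGoodVersion : Prop := ∀ (n : Int), Dom_lastGoodVersion n → Spec_lastGoodVersion n (lastGoodVersion n)

-- ===== LEMMAS AND PROOFS =====

-- with enough fuel, A's loop computes exactly B's recursive search
lemma lgvLoopA_eq_searchB : ∀ (k : Nat) (lo hi : Int), (hi - lo).toNat ≤ k →
    lgvLoopA k lo hi = lgvSearchB lo hi := by
  intro k
  induction k with
  | zero =>
    intro lo hi hk
    have hge : lo ≥ hi := by omega
    rw [lgvSearchB]
    simp [lgvLoopA, hge]
  | succ k ih =>
    intro lo hi hk
    rw [lgvSearchB]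
    by_cases h : lo < hi
    · have hm : PySem.Int.floordiv (lo + hi + 1) 2 = (lo + hi + 1) / 2 :=
        PySem.Int.floordiv_eq_ediv_of_pos (by omega)
      simp only [lgvLoopA, h, if_pos, dif_neg (by omega : ¬ lo ≥ hi)]
      by_cases hb : isBadVersionA (PySem.Int.floordiv (lo + hi + 1) 2)
      · have hb' : isBadVersionB (PySem.Int.floordiv (lo + hi + 1) 2) := hb
        simp only [hb, hb', if_pos]
        exact ih lo (PySem.Int.floordiv (lo + hi + 1) 2 - 1) (by rw [hm]; omega)
      · have hb' : isBadVersionB (PySem.Int.floordiv (lo + hi + 1) 2) = false :=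
          Bool.eq_false_iff.mpr hb
        simp only [Bool.eq_false_iff.mpr hb, hb', Bool.false_eq_true, if_false]
        exact ih (PySem.Int.floordiv (lo + hi + 1) 2) hi (by rw [hm]; omega)
    · simp [lgvLoopA, h, dif_pos (by omega : lo ≥ hi)]

-- ===== VERDICT (by name: the statement is the Claim_ definition above) =====
theorem lastGoodVersion_spec : Claim_equal_lastGoodVersion := by
  intro n _
  unfold Spec_lastGoodVersion lastGoodVersion lastGoodVersion_alt
  exact lgvLoopA_eq_searchB _ 1 n (by omega)
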